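-- pv_equiv track=rewrite | github.com/cyberang3l/blackjack | bj/Deck.py | _generate_suit
-- ===== SOURCE A (Python) =====
-- def _generate_suit(suit_string):
--     """
--     Generate the card labels for a complete suit (13 labels, no joker).
--
--     Arguments:
--      suit_string: The string of the suite to generate.
--
--     Returns:
--      A list with 13 labels.
--     """
--     suit = []
--     for card in range(1, 14):
--         if card == 1: suit.append("{}A".format(suit_string))
--         elif card == 11: suit.append("{}J".format(suit_string))
--         elif card == 12: suit.append("{}Q".format(suit_string))
--         elif card == 13: suit.append("{}K".format(suit_string))
--         else: suit.append("{}{}".format(suit_string, card))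
--
--     return suit
-- ===== SOURCE B (Python) =====
-- _RANKS = ["A", "2", "3", "4", "5", "6", "7", "8", "9", "10", "J", "Q", "K"]
--
-- def _generate_suit(suit_string):
--     return ["{}{}".format(suit_string, r) for r in _RANKS]
-- ===== Notes on version B (the rewrite author's own statement) =====
-- stated objective: simpler
-- what changed: Replaces the 1..13 integer loop with its if/elif rank dispatch by a fixed rank-label table mapped once over label strings.
import Mathlib
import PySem

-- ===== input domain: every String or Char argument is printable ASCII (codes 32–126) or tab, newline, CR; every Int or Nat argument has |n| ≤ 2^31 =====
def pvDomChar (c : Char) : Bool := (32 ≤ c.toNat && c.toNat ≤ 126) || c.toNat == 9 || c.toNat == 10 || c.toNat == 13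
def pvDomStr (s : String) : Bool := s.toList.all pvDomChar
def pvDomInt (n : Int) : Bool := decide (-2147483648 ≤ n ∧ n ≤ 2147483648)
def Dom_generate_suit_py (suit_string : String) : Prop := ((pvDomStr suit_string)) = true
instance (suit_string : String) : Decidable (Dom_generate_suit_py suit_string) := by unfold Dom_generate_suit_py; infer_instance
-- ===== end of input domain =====

-- B replaces A's integer loop with if/elif rank dispatch by a fixed rank-label table mapped once (objective: simpler).

-- ===== PORT A =====
-- literal port of A: loop card over range(1,14), if/elif cascade, append to accumulator
def generate_suit_py (suit_string : String) : List String :=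
  (PySem.List.pyRange 1 14 1).foldl
    (fun suit card =>
      if card = 1 then suit ++ [suit_string ++ "A"]
      else if card = 11 then suit ++ [suit_string ++ "J"]
      else if card = 12 then suit ++ [suit_string ++ "Q"]
      else if card = 13 then suit ++ [suit_string ++ "K"]
      else suit ++ [suit_string ++ PySem.Int.toStr card])
    []

-- ===== PORT B =====
def pvRanks : List String := ["A", "2", "3", "4", "5", "6", "7", "8", "9", "10", "J", "Q", "K"]

def generate_suit_py_alt (suit_string : String) : List String :=
  pvRanks.map (fun r => suit_string ++ r)

-- ===== PRECONDITION & SPEC =====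
def Spec_generate_suit_py (suit_string : String) (out : List String) : Prop := out = generate_suit_py_alt suit_string
instance (suit_string : String) (out : List String) : Decidable (Spec_generate_suit_py suit_string out) := by unfold Spec_generate_suit_py; infer_instance

-- ===== CLAIM (what is proved, stated in full; the proofs are below) =====
def Claim_equal_generate_suit_py : Prop := ∀ (suit_string : String), Dom_generate_suit_py suit_string → Spec_generate_suit_py suit_string (generate_suit_py suit_string)

-- ===== LEMMAS AND PROOFS =====

-- ===== VERDICT (by name: the statement is the Claim_ definition above) =====
theorem generate_suit_py_spec : Claim_equal_generate_suit_py := by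
  intro s _
  show generate_suit_py s = generate_suit_py_alt s
  simp [generate_suit_py, generate_suit_py_alt, pvRanks, PySem.List.pyRange,
        PySem.Int.toStr, PySem.Int.toChars, List.range_succ]
  decide
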